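-- pv_equiv track=rewrite | github.com/pythonjeff/lox | src/ai_options_trader/cli_commands/core/live_cmd.py | _resolve_pair
-- ===== SOURCE A (Python) =====
-- def _pair_to_trade_symbol(pair: str) -> str:
--     # Alpaca trading symbols are commonly "BTCUSD" while data symbols are "BTC/USD".
--     return pair.strip().upper().replace("/", "")
--
-- def _coin_from_pair(pair: str) -> str:
--     s = pair.strip().upper()
--     if "/" in s:
--         return s.split("/", 1)[0].strip()
--     return s
--
-- def _resolve_pair(token: str, pairs: list[str]) -> str | None:
--     """
--     Resolve user input like "ETH" or "ETH/USD" to a configured pair string (e.g., "ETH/USD").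
--     """
--     t = token.strip().upper()
--     if not t:
--         return None
--     # Exact match on pair
--     for p in pairs:
--         if t == p.strip().upper():
--             return p
--     # Match by coin prefix (ETH -> ETH/USD)
--     for p in pairs:
--         if t == _coin_from_pair(p):
--             return p
--     # Allow "ETHUSD" (trade symbol)
--     for p in pairs:
--         if t.replace("/", "") == _pair_to_trade_symbol(p):
--             return p
--     return None
-- ===== SOURCE B (Python) =====
-- def _coin_from_pair(pair: str) -> str:
--     s = pair.strip().upper()
--     if "/" in s:
--         return s.split("/", 1)[0].strip()
--     return s
--
-- def _resolve_pair(token: str, pairs: list[str]) -> str | None: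
--     # Single pass: classify each pair into a match tier (0 exact, 1 coin prefix,
--     # 2 trade symbol) and keep the earliest pair with the best (lowest) tier.
--     t = token.strip().upper()
--     if not t:
--         return None
--     ts = t.replace("/", "")
--     best = None  # (tier, pair); strict '<' keeps the first pair within a tier
--     for p in pairs:
--         u = p.strip().upper()
--         if t == u:
--             tier = 0
--         elif t == _coin_from_pair(p):
--             tier = 1
--         elif ts == u.replace("/", ""):
--             tier = 2
--         else:
--             continue
--         if best is None or tier < best[0]:
--             best = (tier, p)
--     return None if best is None else best[1]
-- ===== Notes on version B (the rewrite author's own statement) =====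
-- stated objective: alternative
-- what changed: Replaces A's three staged scans over pairs with a single pass that classifies each pair into a match tier (0 exact, 1 coin prefix, 2 trade symbol) and keeps the earliest pair with the best tier via a (tier, pair) accumulator.
import Mathlib
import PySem

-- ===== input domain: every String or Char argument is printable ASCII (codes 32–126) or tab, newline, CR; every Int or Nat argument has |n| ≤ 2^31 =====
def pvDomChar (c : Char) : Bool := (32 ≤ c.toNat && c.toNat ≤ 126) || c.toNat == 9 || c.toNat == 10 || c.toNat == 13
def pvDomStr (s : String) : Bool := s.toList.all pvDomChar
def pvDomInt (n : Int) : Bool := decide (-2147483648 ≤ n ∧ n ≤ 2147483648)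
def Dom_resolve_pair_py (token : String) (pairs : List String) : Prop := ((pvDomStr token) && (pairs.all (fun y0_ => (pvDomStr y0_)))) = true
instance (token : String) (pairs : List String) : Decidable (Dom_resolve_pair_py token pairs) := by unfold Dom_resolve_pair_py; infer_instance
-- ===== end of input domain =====

-- B makes one pass classifying each pair into a match tier (exact < coin < symbol)
-- and keeps the earliest best-tier pair, replacing A's three staged scans
-- (objective: alternative; return value unchanged).


-- ===== PORT A =====
-- module helper _coin_from_pair (used by both Pythons);
-- s.split("/", 1)[0]: split with a non-empty separator returns some non-empty list,
-- so the fallback branch is unreachable (kept only to make the match total)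
def coinFromPair (pair : String) : String :=
  let s := PySem.Str.upper (PySem.Str.strip pair)
  if PySem.Str.isIn "/" s then
    match PySem.Str.splitMax? s "/" 1 with
    | some (x :: _) => PySem.Str.strip x
    | _ => s
  else s

-- module helper _pair_to_trade_symbol (used by A)
def pairToTradeSymbol (pair : String) : String :=
  PySem.Str.replace (PySem.Str.upper (PySem.Str.strip pair)) "/" ""

def resolve_pair_py (token : String) (pairs : List String) : Option String :=
  let t := PySem.Str.upper (PySem.Str.strip token)
  if t == "" then none
  else
    match pairs.find? (fun p => t == PySem.Str.upper (PySem.Str.strip p)) with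
    | some p => some p
    | none =>
      match pairs.find? (fun p => t == coinFromPair p) with
      | some p => some p
      | none => pairs.find? (fun p => PySem.Str.replace t "/" "" == pairToTradeSymbol p)

-- ===== PORT B =====
-- the tier of pair p for token t (ts = t with '/' removed): 0 exact, 1 coin, 2 symbol
def pvTier (t ts p : String) : Option Nat :=
  let u := PySem.Str.upper (PySem.Str.strip p)
  if t == u then some 0
  else if t == coinFromPair p then some 1
  else if ts == PySem.Str.replace u "/" "" then some 2
  else none

-- loop body of B: keep the accumulator unless p matches with a strictly better tier
def pvStep (t ts : String) (best : Option (Nat × String)) (p : String) : Option (Nat × String) :=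
  match pvTier t ts p, best with
  | none, b => b
  | some k, none => some (k, p)
  | some k, some (bk, bp) => if k < bk then some (k, p) else some (bk, bp)

def resolve_pair_py_alt (token : String) (pairs : List String) : Option String :=
  let t := PySem.Str.upper (PySem.Str.strip token)
  if t == "" then none
  else
    let ts := PySem.Str.replace t "/" ""
    (pairs.foldl (pvStep t ts) none).map Prod.snd

-- ===== PRECONDITION & SPEC =====
def Spec_resolve_pair_py (token : String) (pairs : List String) (out : Option String) : Prop := out = resolve_pair_py_alt token pairs
instance (token : String) (pairs : List String) (out : Option String) : Decidable (Spec_resolve_pair_py token pairs out) := by unfold Spec_resolve_pair_py; infer_instance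

-- ===== CLAIM (what is proved, stated in full; the proofs are below) =====
def Claim_equal_resolve_pair_py : Prop := ∀ (token : String) (pairs : List String), Dom_resolve_pair_py token pairs → Spec_resolve_pair_py token pairs (resolve_pair_py token pairs)

-- ===== LEMMAS AND PROOFS =====

-- a pair's tier, when defined, is 0, 1 or 2
theorem pvTier_lt3 (t ts p : String) (k : Nat) (h : pvTier t ts p = some k) : k < 3 := by
  unfold pvTier at h
  by_cases h1 : (t == PySem.Str.upper (PySem.Str.strip p)) = true
  · simp [h1] at h; omega
  · by_cases h2 : (t == coinFromPair p) = true
    · simp [h1, h2] at h; omega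
    · by_cases h3 : (ts == PySem.Str.replace (PySem.Str.upper (PySem.Str.strip p)) "/" "") = true
      · simp [h1, h2, h3] at h; omega
      · simp [h1, h2, h3] at h

-- pvStep reduction lemmas
theorem pvStep_none {t ts x : String} (h : pvTier t ts x = none) (b : Option (Nat × String)) :
    pvStep t ts b x = b := by
  unfold pvStep; rw [h]

theorem pvStep_init {t ts x : String} {k : Nat} (h : pvTier t ts x = some k) :
    pvStep t ts none x = some (k, x) := by
  unfold pvStep; rw [h]

theorem pvStep_lt {t ts x : String} {k bk : Nat} {bp : String}
    (h : pvTier t ts x = some k) (hlt : k < bk) :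
    pvStep t ts (some (bk, bp)) x = some (k, x) := by
  unfold pvStep; rw [h]; simp [hlt]

theorem pvStep_ge {t ts x : String} {k bk : Nat} {bp : String}
    (h : pvTier t ts x = some k) (hge : ¬ k < bk) :
    pvStep t ts (some (bk, bp)) x = some (bk, bp) := by
  unfold pvStep; rw [h]; simp [hge]

-- a tier-0 accumulator can never be displaced
theorem foldl_step_zero (t ts : String) (l : List String) (b : String) :
    l.foldl (pvStep t ts) (some (0, b)) = some (0, b) := by
  induction l with
  | nil => rfl
  | cons x xs ih =>
    rw [List.foldl_cons]
    cases hx : pvTier t ts x with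
    | none => rw [pvStep_none hx, ih]
    | some k => rw [pvStep_ge hx (by omega), ih]

-- a tier-1 accumulator is displaced exactly by the first later tier-0 pair
theorem foldl_step_one (t ts : String) (l : List String) (b : String) :
    l.foldl (pvStep t ts) (some (1, b))
      = match l.find? (fun p => pvTier t ts p == some 0) with
        | some q => some (0, q)
        | none => some (1, b) := by
  induction l with
  | nil => rfl
  | cons x xs ih =>
    rw [List.foldl_cons]
    cases hx : pvTier t ts x with
    | none =>
      rw [pvStep_none hx, ih, List.find?_cons_of_neg (by simp [hx])]
    | some k =>
      match k with
      | 0 =>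
        rw [pvStep_lt hx (by omega), foldl_step_zero, List.find?_cons_of_pos (by simp [hx])]
      | (k+1) =>
        rw [pvStep_ge hx (by omega), ih, List.find?_cons_of_neg (by simp [hx])]

-- a tier-2 accumulator is displaced by the first later tier-0, else first tier-1, pair
theorem foldl_step_two (t ts : String) (l : List String) (b : String) :
    l.foldl (pvStep t ts) (some (2, b))
      = match l.find? (fun p => pvTier t ts p == some 0) with
        | some q => some (0, q)
        | none =>
          match l.find? (fun p => pvTier t ts p == some 1) with
          | some q => some (1, q)
          | none => some (2, b) := by
  induction l with
  | nil => rfl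
  | cons x xs ih =>
    rw [List.foldl_cons]
    cases hx : pvTier t ts x with
    | none =>
      rw [pvStep_none hx, ih, List.find?_cons_of_neg (by simp [hx]),
        List.find?_cons_of_neg (by simp [hx])]
    | some k =>
      match k with
      | 0 =>
        rw [pvStep_lt hx (by omega), foldl_step_zero, List.find?_cons_of_pos (by simp [hx])]
      | 1 =>
        rw [pvStep_lt hx (by omega), foldl_step_one, List.find?_cons_of_neg (by simp [hx]),
          List.find?_cons_of_pos (by simp [hx])]
      | (k+2) =>
        rw [pvStep_ge hx (by omega), ih, List.find?_cons_of_neg (by simp [hx]),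
          List.find?_cons_of_neg (by simp [hx])]

-- characterisation of B's fold from the empty accumulator: the tier cascade
theorem foldl_step_none (t ts : String) (l : List String) :
    l.foldl (pvStep t ts) none
      = match l.find? (fun p => pvTier t ts p == some 0) with
        | some q => some (0, q)
        | none =>
          match l.find? (fun p => pvTier t ts p == some 1) with
          | some q => some (1, q)
          | none =>
            match l.find? (fun p => pvTier t ts p == some 2) with
            | some q => some (2, q)
            | none => none := by
  induction l with
  | nil => rfl
  | cons x xs ih =>
    rw [List.foldl_cons]
    cases hx : pvTier t ts x with
    | none =>
      rw [pvStep_none hx, ih, List.find?_cons_of_neg (by simp [hx]),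
        List.find?_cons_of_neg (by simp [hx]), List.find?_cons_of_neg (by simp [hx])]
    | some k =>
      match k with
      | 0 =>
        rw [pvStep_init hx, foldl_step_zero, List.find?_cons_of_pos (by simp [hx])]
      | 1 =>
        rw [pvStep_init hx, foldl_step_one, List.find?_cons_of_neg (by simp [hx]),
          List.find?_cons_of_pos (by simp [hx])]
      | 2 =>
        rw [pvStep_init hx, foldl_step_two, List.find?_cons_of_neg (by simp [hx]),
          List.find?_cons_of_neg (by simp [hx]), List.find?_cons_of_pos (by simp [hx])]
      | (k+3) =>
        exact absurd (pvTier_lt3 t ts x _ hx) (by omega)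

-- if ∀ x ∈ l, p x = q x then find? p l = find? q l
theorem find?_congr_mem {α : Type} (p q : α → Bool) (l : List α)
    (h : ∀ x ∈ l, p x = q x) : l.find? p = l.find? q := by
  induction l with
  | nil => rfl
  | cons x xs ih =>
    simp only [List.find?]
    rw [h x (List.mem_cons_self)]
    cases q x with
    | true => rfl
    | false => exact ih (fun y hy => h y (List.mem_cons_of_mem _ hy))

-- ===== VERDICT (by name: the statement is the Claim_ definition above) =====
theorem resolve_pair_py_spec : Claim_equal_resolve_pair_py := by
  intro token pairs _
  unfold Spec_resolve_pair_py resolve_pair_py resolve_pair_py_alt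
  set t := PySem.Str.upper (PySem.Str.strip token) with ht
  by_cases h0 : (t == "") = true
  · simp [h0]
  · simp only [h0, if_neg, Bool.false_eq_true, not_false_iff]
    rw [foldl_step_none]
    -- tier 0 predicate = A's exact-match predicate
    have e0 : pairs.find? (fun p => pvTier t (PySem.Str.replace t "/" "") p == some 0)
        = pairs.find? (fun p => t == PySem.Str.upper (PySem.Str.strip p)) := by
      apply find?_congr_mem
      intro p _
      simp only [pvTier]
      split_ifs <;> simp_all
    rw [e0]
    cases hf0 : pairs.find? (fun p => t == PySem.Str.upper (PySem.Str.strip p)) with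
    | some q => simp
    | none =>
      have hno0 : ∀ p ∈ pairs, (t == PySem.Str.upper (PySem.Str.strip p)) = false := by
        intro p hp
        simpa using List.find?_eq_none.mp hf0 p hp
      -- with no exact match, tier 1 predicate = A's coin predicate
      have e1 : pairs.find? (fun p => pvTier t (PySem.Str.replace t "/" "") p == some 1)
          = pairs.find? (fun p => t == coinFromPair p) := by
        apply find?_congr_mem
        intro p hp
        have h0' := hno0 p hp
        simp only [pvTier]
        split_ifs <;> simp_all
      rw [e1]
      cases hf1 : pairs.find? (fun p => t == coinFromPair p) with
      | some q => simp
      | none =>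
        have hno1 : ∀ p ∈ pairs, (t == coinFromPair p) = false := by
          intro p hp
          simpa using List.find?_eq_none.mp hf1 p hp
        -- with no exact and no coin match, tier 2 predicate = A's symbol predicate
        have e2 : pairs.find? (fun p => pvTier t (PySem.Str.replace t "/" "") p == some 2)
            = pairs.find? (fun p => PySem.Str.replace t "/" "" == pairToTradeSymbol p) := by
          apply find?_congr_mem
          intro p hp
          have h0' := hno0 p hp
          have h1' := hno1 p hp
          simp only [pvTier, pairToTradeSymbol]
          split_ifs <;> simp_all
        rw [e2]
        cases hf2 : pairs.find? (fun p => PySem.Str.replace t "/" "" == pairToTradeSymbol p) with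
        | some q => simp
        | none => simp
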